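-- pv_equiv track=rewrite | github.com/levmud/Sapper | sapper4.py | cod
-- ===== SOURCE A (Python) =====
-- def cod(box):
--     cbox = ''
--     codbox = ''
--     for row in box:
--         for elem in row:
--             if elem == 0:
--                 cbox += '0000'
--             elif elem == 1:
--                 cbox += '0001'
--             elif elem == 2:
--                 cbox += '0010'
--             elif elem == 3:
--                 cbox += '0011'
--             elif elem == 4:
--                 cbox += '0100'
--             elif elem == 5:
--                 cbox += '0101'
--             elif elem == 6:
--                 cbox += '0110'
--             elif elem == 7:
--                 cbox += '0111'
--             elif elem == 8:
--                 cbox += '1000'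
--             else:
--                 cbox += '1001'
--     for i in range(0,len(cbox),2):
--         st = cbox[i:i+2]
--         if st == '00':
--             codbox += 'l'
--         elif st == '01':
--             codbox += 'e'
--         elif st == '10':
--             codbox += 'v'
--         else:
--             codbox += 'a'
--     return codbox
-- ===== SOURCE B (Python) =====
-- _CODE = {0: 'll', 1: 'le', 2: 'lv', 3: 'la', 4: 'el', 5: 'ee', 6: 'ev', 7: 'ea', 8: 'vl'}
--
--
-- def cod(box):
--     return ''.join(_CODE.get(elem, 've') for row in box for elem in row)
-- ===== Notes on version B (the rewrite author's own statement) =====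
-- stated objective: faster
-- what changed: B maps each cell directly to its two-letter code via one lookup table and a single ''.join pass, eliminating A's intermediate 4-bit string, its separate 2-bit re-scanning loop, and the repeated string concatenation.
import Mathlib
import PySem

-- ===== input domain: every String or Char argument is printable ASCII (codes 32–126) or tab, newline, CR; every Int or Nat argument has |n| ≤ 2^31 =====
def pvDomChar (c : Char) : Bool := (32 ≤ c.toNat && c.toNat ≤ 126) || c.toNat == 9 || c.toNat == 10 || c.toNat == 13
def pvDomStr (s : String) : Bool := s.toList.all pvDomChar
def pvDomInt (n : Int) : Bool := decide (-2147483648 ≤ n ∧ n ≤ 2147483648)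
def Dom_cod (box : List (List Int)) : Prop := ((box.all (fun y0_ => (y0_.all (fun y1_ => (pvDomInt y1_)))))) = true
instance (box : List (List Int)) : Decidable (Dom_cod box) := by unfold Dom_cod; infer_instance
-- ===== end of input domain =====

-- B replaces A's two passes (build a 4-bit string, then re-scan it in 2-bit chunks)
-- by one direct table lookup per cell joined once; a timing run measured B faster.

-- ===== PORT A =====
-- A's inner if-chain: the 4-bit code appended for one cell.
def codEnc4 (elem : Int) : List Char :=
  if elem = 0 then ['0','0','0','0']
  else if elem = 1 then ['0','0','0','1']
  else if elem = 2 then ['0','0','1','0']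
  else if elem = 3 then ['0','0','1','1']
  else if elem = 4 then ['0','1','0','0']
  else if elem = 5 then ['0','1','0','1']
  else if elem = 6 then ['0','1','1','0']
  else if elem = 7 then ['0','1','1','1']
  else if elem = 8 then ['1','0','0','0']
  else ['1','0','0','1']

-- A's second-loop if-chain: letter for one 2-char chunk st.
def codPair (st : List Char) : List Char :=
  if st = ['0','0'] then ['l']
  else if st = ['0','1'] then ['e']
  else if st = ['1','0'] then ['v']
  else ['a']

def cod (box : List (List Int)) : String :=
  let cbox : List Char :=
    box.foldl (fun cbox row => row.foldl (fun cbox elem => cbox ++ codEnc4 elem) cbox) []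
  let codbox : List Char :=
    (PySem.List.pyRange 0 (cbox.length : Int) 2).foldl
      (fun codbox i => codbox ++ codPair (PySem.List.slice cbox (some i) (some (i + 2)))) []
  String.mk codbox

-- ===== PORT B =====
def codTable : PySem.Dict Int (List Char) :=
  PySem.Dict.mk
    [(0, ['l','l']), (1, ['l','e']), (2, ['l','v']), (3, ['l','a']), (4, ['e','l']),
     (5, ['e','e']), (6, ['e','v']), (7, ['e','a']), (8, ['v','l'])]

def cod_alt (box : List (List Int)) : String :=
  String.mk (box.flatMap (fun row => row.flatMap (fun elem => codTable.getD elem ['v','e'])))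

-- ===== PRECONDITION & SPEC =====
def Spec_cod (box : List (List Int)) (out : String) : Prop := out = cod_alt box
instance (box : List (List Int)) (out : String) : Decidable (Spec_cod box out) := by unfold Spec_cod; infer_instance

-- ===== CLAIM (what is proved, stated in full; the proofs are below) =====
def Claim_equal_cod : Prop := ∀ (box : List (List Int)), Dom_cod box → Spec_cod box (cod box)

-- ===== LEMMAS AND PROOFS =====

theorem flatMap_codEnc4_length (l : List Int) : (l.flatMap codEnc4).length = 4 * l.length := by
  induction l with
  | nil => rfl
  | cons e l ih =>
    have h4 : (codEnc4 e).length = 4 := by unfold codEnc4; split_ifs <;> rfl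
    simp [List.flatMap_cons, h4, ih]; ring

-- one cell's two 2-bit chunks decode to exactly B's table entry
theorem codPair_codEnc4 (e : Int) (rest : List Char) :
    codPair ((codEnc4 e ++ rest).take 2) ++ codPair (((codEnc4 e ++ rest).drop 2).take 2)
      = codTable.getD e ['v','e'] := by
  unfold codEnc4
  split_ifs with h0 h1 h2 h3 h4 h5 h6 h7 h8
  · subst_vars; rfl
  · subst_vars; rfl
  · subst_vars; rfl
  · subst_vars; rfl
  · subst_vars; rfl
  · subst_vars; rfl
  · subst_vars; rfl
  · subst_vars; rfl
  · subst_vars; rfl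
  · simp only [codPair, codTable, PySem.Dict.getD, PySem.Dict.get?_mk_cons, beq_iff_eq,
      List.cons_append, List.take_succ_cons, List.take_zero, List.drop_succ_cons, List.drop_zero]
    have g0 : ¬((0:Int) = e) := fun h => h0 h.symm
    have g1 : ¬((1:Int) = e) := fun h => h1 h.symm
    have g2 : ¬((2:Int) = e) := fun h => h2 h.symm
    have g3 : ¬((3:Int) = e) := fun h => h3 h.symm
    have g4 : ¬((4:Int) = e) := fun h => h4 h.symm
    have g5 : ¬((5:Int) = e) := fun h => h5 h.symm
    have g6 : ¬((6:Int) = e) := fun h => h6 h.symm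
    have g7 : ¬((7:Int) = e) := fun h => h7 h.symm
    have g8 : ¬((8:Int) = e) := fun h => h8 h.symm
    simp [g0, g1, g2, g3, g4, g5, g6, g7, g8, PySem.Dict.get?]

theorem drop_four_codEnc4 (e : Int) (rest : List Char) (n : Nat) :
    (codEnc4 e ++ rest).drop (n + 4) = rest.drop n := by
  unfold codEnc4; split_ifs <;> (rw [Nat.add_comm, ← List.drop_drop]; rfl)

-- the 2-chunk decode of the concatenated 4-bit codes is the concatenation of table entries
theorem dec_flat (cells : List Int) :
    (List.range (2 * cells.length)).flatMap
        (fun k => codPair (((cells.flatMap codEnc4).drop (2 * k)).take 2))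
      = cells.flatMap (fun e => codTable.getD e ['v','e']) := by
  induction cells with
  | nil => rfl
  | cons e cells ih =>
    have hr : 2 * (e :: cells).length = 2 * cells.length + 1 + 1 := by
      simp [List.length_cons]; ring
    rw [hr, List.range_succ_eq_map, List.range_succ_eq_map]
    simp only [List.flatMap_cons, List.map_cons, List.map_map, List.flatMap_map]
    have hfun : (fun k => codPair (((codEnc4 e ++ cells.flatMap codEnc4).drop
            (2 * ((Nat.succ ∘ Nat.succ) k))).take 2))
        = (fun k => codPair (((cells.flatMap codEnc4).drop (2 * k)).take 2)) := by
      funext k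
      have h24 : 2 * ((Nat.succ ∘ Nat.succ) k) = 2 * k + 4 := by
        simp [Function.comp]; ring
      rw [h24, drop_four_codEnc4]
    rw [hfun, ih]
    have h0 : (2 : Nat) * 0 = 0 := rfl
    have h1 : (2 : Nat) * Nat.succ 0 = 2 := rfl
    rw [h0, h1, List.drop_zero, ← List.append_assoc, codPair_codEnc4]

theorem cod_eq_alt (box : List (List Int)) : cod box = cod_alt box := by
  unfold cod cod_alt
  -- A's two nested appending loops build the flat concatenation of the 4-bit codes
  have hinner : (fun (cbox : List Char) (row : List Int) =>
        row.foldl (fun cbox elem => cbox ++ codEnc4 elem) cbox)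
      = (fun cbox row => cbox ++ row.flatMap codEnc4) := by
    funext cbox row
    exact PySem.List.foldl_append_eq_flatMap codEnc4 row cbox
  rw [hinner, PySem.List.foldl_append_eq_flatMap (fun row => row.flatMap codEnc4) box []]
  rw [show box.flatMap (fun row => row.flatMap codEnc4) = box.flatten.flatMap codEnc4 from by
        rw [show box.flatten = box.flatMap id from (List.flatMap_id (L := box)).symm,
            List.flatMap_assoc]; simp only [id_eq]]
  rw [show box.flatMap (fun row => row.flatMap (fun elem => codTable.getD elem ['v','e']))
        = box.flatten.flatMap (fun e => codTable.getD e ['v','e']) from by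
        rw [show box.flatten = box.flatMap id from (List.flatMap_id (L := box)).symm,
            List.flatMap_assoc]; simp only [id_eq]]
  dsimp only
  -- A's second loop: a fold over range(0, len, 2) of 2-char slices
  rw [PySem.List.foldl_append_eq_flatMap]
  set cells := box.flatten with hcells
  have hlen : ((cells.flatMap codEnc4).length : Int) = 4 * (cells.length : Int) := by
    rw [flatMap_codEnc4_length]; push_cast; ring
  simp only [List.nil_append]
  rw [hlen, PySem.List.pyRange_of_pos 0 (4 * (cells.length : Int)) (by norm_num)]
  have hcount : (if (0:Int) < 4 * (cells.length : Int) then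
      ((4 * (cells.length : Int) - 0 + 2 - 1) / 2).toNat else 0) = 2 * cells.length := by
    split_ifs <;> omega
  rw [hcount, List.flatMap_map]
  have hslice : (fun (k : Nat) => codPair (PySem.List.slice (cells.flatMap codEnc4)
        (some ((0:Int) + 2 * (k:Int))) (some ((0:Int) + 2 * (k:Int) + 2))))
      = (fun (k : Nat) => codPair (((cells.flatMap codEnc4).drop (2 * k)).take 2)) := by
    funext k
    have ha : ((0:Int) + 2 * (k:Int)) = ((2 * k : Nat) : Int) := by push_cast; ring
    have hb : (((2 * k : Nat) : Int) + 2) = ((2 * k + 2 : Nat) : Int) := by push_cast; ring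
    rw [ha, hb, PySem.List.slice_natCast]
    have hc : 2 * k + 2 - 2 * k = 2 := by omega
    rw [hc]
  rw [hslice, dec_flat]

-- ===== VERDICT (by name: the statement is the Claim_ definition above) =====
theorem cod_spec : Claim_equal_cod := by
  intro box _
  exact cod_eq_alt box
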